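-- pv_equiv track=rewrite | github.com/dotunpeters/coding_challenge | permutationGame.py | permutationGame
-- ===== SOURCE A (Python) =====
-- def permutationGame(arr):
--     #
--     # Write your code here.
--     #
--     player = 0
--     while True:
--
--         if len(arr) == 1:
--             if player%2 == 0:
--                 return "Bob"
--             else:
--                 return "Alice"
--
--         if arr == sorted(arr):
--             if player%2 == 0:
--                 return "Bob"
--             else:
--                 return "Alice"
--
--         maxim = arr.index(max(arr))
--         arr.pop(maxim)
--         player += 1
-- ===== SOURCE B (Python) =====
-- def permutationGame(arr):
--     n = len(arr)
--     order = sorted((v, -i) for i, v in enumerate(arr))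
--     m = 0
--     low_max = -1   # max original index among accepted elements with value < current value
--     cur_max = -1   # max index among accepted elements carrying the current value
--     prev = None
--     for v, negi in order:
--         i = -negi
--         if prev is not None and v != prev:
--             low_max = max(low_max, cur_max)
--             cur_max = -1
--         if i < low_max:
--             break
--         cur_max = max(cur_max, i)
--         prev = v
--         m += 1
--     return "Bob" if (n - m) % 2 == 0 else "Alice"
-- ===== Notes on version B (the rewrite author's own statement) =====
-- stated objective: faster
-- what changed: A repeatedly re-sorts the list, finds and pops the first maximum until the remainder is sorted (O(n^2 log n)); B sorts the (value, -index) pairs once and makes a single linear scan that counts how many elements survive, deriving the move count (and the winner's parity) as n minus that count.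
import Mathlib
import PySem

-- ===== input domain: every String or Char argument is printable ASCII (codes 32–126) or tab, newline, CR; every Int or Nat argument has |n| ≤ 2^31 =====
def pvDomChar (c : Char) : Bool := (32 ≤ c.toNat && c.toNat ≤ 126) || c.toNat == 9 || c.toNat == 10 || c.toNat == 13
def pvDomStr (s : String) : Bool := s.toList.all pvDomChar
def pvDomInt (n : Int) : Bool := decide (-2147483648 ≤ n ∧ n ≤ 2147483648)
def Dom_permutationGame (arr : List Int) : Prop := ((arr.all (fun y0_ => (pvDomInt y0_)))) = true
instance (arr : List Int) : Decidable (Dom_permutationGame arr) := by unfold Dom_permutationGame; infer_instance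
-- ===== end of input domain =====

-- B replaces A's repeated sort/max/pop simulation by one sort plus a single linear scan
-- (asymptotically faster); A mutates its Python argument in place (pops), the equivalence
-- proved here is about the return value only.

-- ===== PORT A =====
-- A's while-loop: each iteration removes one element, so length+1 fuel always suffices;
-- the "" branches are unreachable (arr nonempty and index in range at those points).
def pgLoopA : Nat → List Int → Int → String
  | 0, _, _ => ""
  | fuel+1, arr, player =>
    if arr.length = 1 then
      (if PySem.Int.mod player 2 = 0 then "Bob" else "Alice")
    else if arr = PySem.List.sorted arr (fun x => x) then
      (if PySem.Int.mod player 2 = 0 then "Bob" else "Alice")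
    else
      match PySem.List.max? arr (fun x => x) with
      | none => ""
      | some mx =>
        match PySem.List.index? arr mx with
        | none => ""
        | some maxim =>
          match PySem.List.pop? arr (maxim : Int) with
          | none => ""
          | some (_, rest) => pgLoopA fuel rest (player + 1)

def permutationGame (arr : List Int) : String := pgLoopA (arr.length + 1) arr 0

-- ===== PORT B =====
-- Source B's scan loop: state (m, low_max, cur_max, prev); returning m is the 'break'.
def pgScan : List (Int × Int) → Int → Int → Int → Option Int → Int
  | [], m, _, _, _ => m
  | (v, negi) :: rest, m, lowMax, curMax, prev =>
    let i := -negi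
    let lowMax' := match prev with
      | some p => if v ≠ p then max lowMax curMax else lowMax
      | none => lowMax
    let curMax' := match prev with
      | some p => if v ≠ p then (-1 : Int) else curMax
      | none => curMax
    if i < lowMax' then m
    else pgScan rest (m + 1) lowMax' (max curMax' i) (some v)

def permutationGame_alt (arr : List Int) : String :=
  let n : Int := arr.length
  let order := PySem.List.sorted2 ((PySem.List.enumerate arr).map (fun p => (p.2, -p.1))) Prod.fst Prod.snd
  let m := pgScan order 0 (-1) (-1) none
  if PySem.Int.mod (n - m) 2 = 0 then "Bob" else "Alice"

-- ===== PRECONDITION & SPEC =====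
def Spec_permutationGame (arr : List Int) (out : String) : Prop := out = permutationGame_alt arr
instance (arr : List Int) (out : String) : Decidable (Spec_permutationGame arr out) := by unfold Spec_permutationGame; infer_instance

-- ===== CLAIM (what is proved, stated in full; the proofs are below) =====
def Claim_equal_permutationGame : Prop := ∀ (arr : List Int), Dom_permutationGame arr → Spec_permutationGame arr (permutationGame arr)

-- ===== LEMMAS AND PROOFS =====

-- Proof-side abbreviations for the pieces of B.
def pgPairs (arr : List Int) : List (Int × Int) :=
  (PySem.List.enumerate arr).map (fun p => (p.2, -p.1))
def pgOrder (arr : List Int) : List (Int × Int) :=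
  PySem.List.sorted2 (pgPairs arr) Prod.fst Prod.snd
def pgM (arr : List Int) : Int := pgScan (pgOrder arr) 0 (-1) (-1) none

-- Python's lexicographic < on the (value, -index) pairs B sorts.
def lexLt (p q : Int × Int) : Prop := p.1 < q.1 ∨ (p.1 = q.1 ∧ p.2 < q.2)
def lexLe (p q : Int × Int) : Prop := ¬ lexLt q p

-- Full-state scanner (proof-side only): inl m = the scan broke returning m,
-- inr (m, lowMax, curMax, prev) = the scan consumed the whole list.
def pgScanF : List (Int × Int) → Int → Int → Int → Option Int → (Int ⊕ (Int × Int × Int × Option Int))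
  | [], m, lowMax, curMax, prev => .inr (m, lowMax, curMax, prev)
  | (v, negi) :: rest, m, lowMax, curMax, prev =>
    let i := -negi
    let lowMax' := match prev with
      | some p => if v ≠ p then max lowMax curMax else lowMax
      | none => lowMax
    let curMax' := match prev with
      | some p => if v ≠ p then (-1 : Int) else curMax
      | none => curMax
    if i < lowMax' then .inl m
    else pgScanF rest (m + 1) lowMax' (max curMax' i) (some v)

theorem pgScan_eq_scanF (l : List (Int × Int)) (m lm cm : Int) (prev : Option Int) :
    pgScan l m lm cm prev = (match pgScanF l m lm cm prev with | .inl m' => m' | .inr s => s.1) := by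
  induction l generalizing m lm cm prev with
  | nil => rfl
  | cons p rest ih =>
    obtain ⟨v, negi⟩ := p
    simp only [pgScan, pgScanF]
    split_ifs <;> simp [ih]

theorem pgScanF_append (l l₂ : List (Int × Int)) (m lm cm : Int) (prev : Option Int) :
    pgScanF (l ++ l₂) m lm cm prev =
      (match pgScanF l m lm cm prev with
       | .inl m' => .inl m'
       | .inr s => pgScanF l₂ s.1 s.2.1 s.2.2.1 s.2.2.2) := by
  induction l generalizing m lm cm prev with
  | nil => rfl
  | cons p rest ih =>
    obtain ⟨v, negi⟩ := p
    simp only [List.cons_append, pgScanF]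
    split_ifs <;> simp [ih]

theorem pgScanF_inr_m (l : List (Int × Int)) (m lm cm : Int) (prev : Option Int)
    (s : Int × Int × Int × Option Int) (h : pgScanF l m lm cm prev = .inr s) :
    s.1 = m + l.length := by
  induction l generalizing m lm cm prev with
  | nil => simp only [pgScanF] at h; cases h; simp
  | cons p rest ih =>
    obtain ⟨v, negi⟩ := p
    simp only [pgScanF] at h
    split_ifs at h
    all_goals (have := ih _ _ _ _ h; simp [this]; ring)


-- Per-shape unfoldings of the scan step.
theorem pgScanF_cons_none (v negi : Int) (rest : List (Int × Int)) (m lm cm : Int) :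
    pgScanF ((v, negi) :: rest) m lm cm none =
      if -negi < lm then .inl m else pgScanF rest (m + 1) lm (max cm (-negi)) (some v) := rfl

theorem pgScanF_cons_eq (v negi : Int) (rest : List (Int × Int)) (m lm cm : Int) :
    pgScanF ((v, negi) :: rest) m lm cm (some v) =
      if -negi < lm then .inl m else pgScanF rest (m + 1) lm (max cm (-negi)) (some v) := by
  simp [pgScanF]

theorem pgScanF_cons_ne (v negi pv : Int) (rest : List (Int × Int)) (m lm cm : Int)
    (h : v ≠ pv) :
    pgScanF ((v, negi) :: rest) m lm cm (some pv) =
      if -negi < max lm cm then .inl m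
      else pgScanF rest (m + 1) (max lm cm) (max (-1) (-negi)) (some v) := by
  simp [pgScanF, h]

-- The Boolean comparator sorted2 uses on our (value, -index) pairs.
def pgBefore (a b : Int × Int) : Bool :=
  decide (a.1 < b.1) || (!decide (b.1 < a.1) && decide (a.2 < b.2))

theorem pgBefore_iff (a b : Int × Int) : pgBefore a b = true ↔ lexLt a b := by
  simp [pgBefore, lexLt]; omega

theorem insertBy_pairwise_lex (x : Int × Int) (ys : List (Int × Int))
    (h : ys.Pairwise lexLe) : (PySem.List.insertBy pgBefore x ys).Pairwise lexLe := by
  induction ys with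
  | nil => simp [PySem.List.insertBy.eq_1]
  | cons y ys ih =>
    rw [PySem.List.insertBy.eq_2]
    rcases List.pairwise_cons.mp h with ⟨hy, hys⟩
    split_ifs with hb
    · have hxy : lexLt x y := (pgBefore_iff x y).mp hb
      refine List.pairwise_cons.mpr ⟨?_, h⟩
      intro z hz
      rcases List.mem_cons.mp hz with rfl | hz
      · simp [lexLe, lexLt] at *; omega
      · have := hy z hz
        simp [lexLe, lexLt] at *; omega
    · have hxy : ¬ lexLt x y := by simpa [pgBefore_iff] using hb
      refine List.pairwise_cons.mpr ⟨?_, ih hys⟩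
      intro z hz
      rcases (PySem.List.mem_insertBy pgBefore x z ys).mp hz with rfl | hz
      · exact hxy
      · exact hy z hz

-- The sorted2 output is lexicographically nondecreasing.
theorem pgOrder_pairwise (arr : List Int) : (pgOrder arr).Pairwise lexLe := by
  show (PySem.List.sorted2 (pgPairs arr) Prod.fst Prod.snd).Pairwise lexLe
  rw [PySem.List.sorted2]
  simp only [if_neg (by simp : ¬ (false = true))]
  generalize pgPairs arr = xs
  have : ∀ (xs acc : List (Int × Int)), acc.Pairwise lexLe →
      (List.foldl (fun acc x => PySem.List.insertBy pgBefore x acc) acc xs).Pairwise lexLe := by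
    intro xs
    induction xs with
    | nil => intro acc h; simpa
    | cons x xs ih => intro acc h; exact ih _ (insertBy_pairwise_lex x acc h)
  exact this xs [] (by simp)

theorem pgOrder_perm (arr : List Int) : (pgOrder arr).Perm (pgPairs arr) :=
  PySem.List.sorted2_perm _ _ _ _

-- Uniqueness of the sorted order (lexLe is antisymmetric on Int × Int).
theorem pgOrder_eq_of_perm_of_pairwise (arr : List Int) (ys : List (Int × Int))
    (hp : ys.Perm (pgPairs arr)) (hs : ys.Pairwise lexLt) : pgOrder arr = ys := by
  have hperm : (pgOrder arr).Perm ys := (pgOrder_perm arr).trans hp.symm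
  refine List.Perm.eq_of_pairwise ?_ (pgOrder_pairwise arr)
    (hs.imp (fun {a b} hab => by simp [lexLe, lexLt] at *; omega)) hperm
  intro a b _ _ h1 h2
  simp [lexLe, lexLt] at h1 h2
  have : a.1 = b.1 ∧ a.2 = b.2 := by omega
  exact Prod.ext this.1 this.2

theorem mem_pgOrder (arr : List Int) (p : Int × Int) :
    p ∈ pgOrder arr ↔ ∃ (k : Nat), ∃ (h : k < arr.length), p = (arr[k], -(k : Int)) := by
  rw [(pgOrder_perm arr).mem_iff]
  simp only [pgPairs, List.mem_map, PySem.List.mem_enumerate_iff]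
  constructor
  · rintro ⟨q, ⟨k, hk, rfl⟩, rfl⟩
    exact ⟨k, hk, by simp⟩
  · rintro ⟨k, hk, rfl⟩
    exact ⟨(k, arr[k]), ⟨k, hk, by simp⟩, by simp⟩

theorem pgOrder_snd_ne (arr : List Int) :
    (pgOrder arr).Pairwise (fun p q => p.2 ≠ q.2) := by
  have hnd : ((pgPairs arr).map Prod.snd).Nodup := by
    simp only [pgPairs, List.map_map]
    have heq : (Prod.snd ∘ fun p : Int × Int => (p.2, -p.1)) = fun p : Int × Int => -p.1 := rfl
    rw [heq]
    have hp := PySem.List.pairwise_lt_enumerate arr 0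
    rw [List.Nodup, List.pairwise_map]
    exact hp.imp (fun {a b} h => by omega)
  have hperm : ((pgOrder arr).map Prod.snd).Perm ((pgPairs arr).map Prod.snd) :=
    (pgOrder_perm arr).map Prod.snd
  have : ((pgOrder arr).map Prod.snd).Nodup := hperm.nodup_iff.mpr hnd
  rw [List.Nodup, List.pairwise_map] at this
  exact this

-- Scan completion: on a lexicographically nondecreasing list whose value order agrees with
-- its index order, the scan never breaks.
theorem pgScanF_complete (l : List (Int × Int)) (m lm cm : Int) (prev : Option Int)
    (h1 : l.Pairwise lexLe)
    (h2 : ∀ p ∈ l, ∀ q ∈ l, p.1 < q.1 → -p.2 < -q.2)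
    (h3 : ∀ p ∈ l, lm < -p.2)
    (h4 : ∀ p ∈ l, prev ≠ some p.1 → cm < -p.2)
    (h5 : ∀ p ∈ l, ∀ pv, prev = some pv → pv ≤ p.1)
    (h6 : ∀ p ∈ l, 0 ≤ -p.2) :
    ∃ s, pgScanF l m lm cm prev = .inr s := by
  induction l generalizing m lm cm prev with
  | nil => exact ⟨_, rfl⟩
  | cons p rest ih =>
    obtain ⟨v, negi⟩ := p
    have hmem : ((v, negi) : Int × Int) ∈ (v, negi) :: rest := List.mem_cons_self ..
    have h3h := h3 _ hmem
    have h6h := h6 _ hmem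
    rcases List.pairwise_cons.mp h1 with ⟨hhead, h1r⟩
    have hv_le : ∀ q ∈ rest, v ≤ q.1 := by
      intro q hq
      have := hhead q hq
      simp only [lexLe, lexLt, not_or, not_and, not_lt] at this
      omega
    have h2r : ∀ p ∈ rest, ∀ q ∈ rest, p.1 < q.1 → -p.2 < -q.2 :=
      fun p hp q hq => h2 p (List.mem_cons_of_mem _ hp) q (List.mem_cons_of_mem _ hq)
    have h6r : ∀ p ∈ rest, 0 ≤ -p.2 := fun p hp => h6 p (List.mem_cons_of_mem _ hp)
    have h3r : ∀ p ∈ rest, lm < -p.2 := fun p hp => h3 p (List.mem_cons_of_mem _ hp)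
    have hhead2 : ∀ q ∈ rest, v < q.1 → -negi < -q.2 := by
      intro q hq hvq
      exact h2 _ hmem q (List.mem_cons_of_mem _ hq) hvq
    have hv_lt : ∀ q ∈ rest, some v ≠ some q.1 → v < q.1 := by
      intro q hq hne
      rcases lt_or_eq_of_le (hv_le q hq) with h | h
      · exact h
      · exact absurd (congrArg some h) hne
    have h5r : ∀ q ∈ rest, ∀ pv', some v = some pv' → pv' ≤ q.1 := by
      intro q hq pv' hpv'
      cases hpv'; exact hv_le q hq
    cases prev with
    | none =>
      rw [pgScanF_cons_none, if_neg (by omega)]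
      exact ih (m + 1) lm (max cm (-negi)) (some v) h1r h2r h3r
        (fun q hq hne => by
          have := hhead2 q hq (hv_lt q hq hne)
          have := h4 q (List.mem_cons_of_mem _ hq) (by simp)
          simp only [max_lt_iff]; omega)
        h5r h6r
    | some pv =>
      have hpv_le_v : pv ≤ v := h5 _ hmem pv rfl
      by_cases hvp : v = pv
      · subst hvp
        rw [pgScanF_cons_eq, if_neg (by omega)]
        exact ih (m + 1) lm (max cm (-negi)) (some v) h1r h2r h3r
          (fun q hq hne => by
            have := hhead2 q hq (hv_lt q hq hne)
            have := h4 q (List.mem_cons_of_mem _ hq) hne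
            simp only [max_lt_iff]; omega)
          h5r h6r
      · have hcmh : cm < -negi := h4 _ hmem (fun hc => hvp (Option.some.inj hc).symm)
        rw [pgScanF_cons_ne v negi pv rest _ _ _ hvp, if_neg (by rw [not_lt, max_le_iff]; omega)]
        refine ih (m + 1) (max lm cm) (max (-1) (-negi)) (some v) h1r h2r ?_ ?_ h5r h6r
        · intro q hq
          have h3q := h3r q hq
          have h4q : cm < -q.2 := by
            refine h4 q (List.mem_cons_of_mem _ hq) ?_
            have := hv_le q hq
            intro hc
            have : pv = q.1 := Option.some.inj hc
            omega
          simp only [max_lt_iff]; omega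
        · intro q hq hne
          have := hhead2 q hq (hv_lt q hq hne)
          have h6q := h6r q hq
          simp only [max_lt_iff]; omega

-- Converse: if the scan consumes everything, the accepted list is value/index monotone.
theorem pgScanF_fin_mono (l A : List (Int × Int)) (m lm cm : Int) (prev : Option Int)
    (hfin : ∃ s, pgScanF l m lm cm prev = .inr s)
    (h1 : (A ++ l).Pairwise lexLe)
    (hne : (A ++ l).Pairwise (fun p q => p.2 ≠ q.2))
    (hst : (A = [] ∧ prev = none) ∨
      (∃ pv, prev = some pv ∧ (∀ p ∈ A, p.1 ≤ pv) ∧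
        (∀ p ∈ A, p.1 = pv → -p.2 ≤ cm) ∧ (∀ p ∈ A, p.1 < pv → -p.2 ≤ lm)))
    (hKA : ∀ p ∈ A, ∀ q ∈ A, p.1 < q.1 → -p.2 < -q.2) :
    ∀ p ∈ A ++ l, ∀ q ∈ A ++ l, p.1 < q.1 → -p.2 < -q.2 := by
  induction l generalizing A m lm cm prev with
  | nil => simpa using hKA
  | cons hd rest ih =>
    obtain ⟨v, negi⟩ := hd
    -- cross facts from pairwise hypotheses
    have hcross_le : ∀ p ∈ A, p.1 ≤ v := by
      intro p hp
      have := (List.pairwise_append.mp h1).2.2 p hp (v, negi) (List.mem_cons_self ..)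
      simp only [lexLe, lexLt, not_or, not_and, not_lt] at this
      omega
    have hcross_ne : ∀ p ∈ A, p.2 ≠ negi := by
      intro p hp
      exact (List.pairwise_append.mp hne).2.2 p hp (v, negi) (List.mem_cons_self ..)
    have happ : A ++ (v, negi) :: rest = (A ++ [(v, negi)]) ++ rest := by
      rw [List.append_cons]
    rw [happ] at h1 hne ⊢
    rcases hst with ⟨rfl, rfl⟩ | ⟨pv, rfl, hstA, hstC, hstL⟩
    · -- A = [], prev = none
      rw [pgScanF_cons_none] at hfin
      rcases hfin with ⟨s, hs⟩
      split_ifs at hs with hbr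
      refine ih (A := [(v, negi)]) _ _ _ _ ⟨s, hs⟩ h1 hne ?_ ?_
      · refine Or.inr ⟨v, rfl, ?_, ?_, ?_⟩ <;> intro p hp <;> simp at hp <;> subst hp <;> simp
      · intro p hp q hq
        simp at hp hq
        subst hp; subst hq; omega
    · by_cases hvp : v = pv
      · subst hvp
        rw [pgScanF_cons_eq] at hfin
        rcases hfin with ⟨s, hs⟩
        split_ifs at hs with hbr
        rw [not_lt] at hbr
        refine ih (A := A ++ [(v, negi)]) _ _ _ _ ⟨s, hs⟩ h1 hne ?_ ?_
        · refine Or.inr ⟨v, rfl, ?_, ?_, ?_⟩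
          · intro p hp
            rcases List.mem_append.mp hp with hp | hp
            · exact hstA p hp
            · simp at hp; subst hp; simp
          · intro p hp hpv
            rcases List.mem_append.mp hp with hp | hp
            · have := hstC p hp hpv; simp only [le_max_iff]; omega
            · simp at hp; subst hp; simp only [le_max_iff]; omega
          · intro p hp hpv
            rcases List.mem_append.mp hp with hp | hp
            · exact hstL p hp hpv
            · simp at hp; subst hp; simp at hpv
        · intro p hp q hq hlt
          rcases List.mem_append.mp hp with hp | hp <;>
            rcases List.mem_append.mp hq with hq | hq
          · exact hKA p hp q hq hlt
          · simp at hq; subst hq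
            have h1' := hstL p hp (by omega)
            have h2' := hcross_ne p hp
            omega
          · simp at hp; subst hp
            have := hstA q hq; simp at hlt; omega
          · simp at hp hq; subst hp; subst hq; omega
      · rw [pgScanF_cons_ne v negi pv rest _ _ _ hvp] at hfin
        rcases hfin with ⟨s, hs⟩
        split_ifs at hs with hbr
        rw [not_lt, max_le_iff] at hbr
        have hF : ∀ p ∈ A, -p.2 ≤ max lm cm := by
          intro p hp
          have h1' := hstA p hp
          rcases lt_or_eq_of_le h1' with h | h
          · have := hstL p hp h; simp only [le_max_iff]; omega
          · have := hstC p hp h; simp only [le_max_iff]; omega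
        refine ih (A := A ++ [(v, negi)]) _ _ _ _ ⟨s, hs⟩ h1 hne ?_ ?_
        · refine Or.inr ⟨v, rfl, ?_, ?_, ?_⟩
          · intro p hp
            rcases List.mem_append.mp hp with hp | hp
            · exact hcross_le p hp
            · simp at hp; subst hp; simp
          · intro p hp hpv
            rcases List.mem_append.mp hp with hp | hp
            · have := hF p hp; simp only [le_max_iff]; omega
            · simp at hp; subst hp; simp only [le_max_iff]; omega
          · intro p hp hpv
            rcases List.mem_append.mp hp with hp | hp
            · have := hF p hp; simp only [le_max_iff]; omega
            · simp at hp; subst hp; simp at hpv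
        · intro p hp q hq hlt
          rcases List.mem_append.mp hp with hp | hp <;>
            rcases List.mem_append.mp hq with hq | hq
          · exact hKA p hp q hq hlt
          · simp at hq; subst hq
            have h1' := hF p hp
            have h2' := hcross_ne p hp
            omega
          · simp at hp; subst hp
            have := hcross_le q hq; simp at hlt; omega
          · simp at hp hq; subst hp; subst hq; omega

-- Relabelling invariance of the scan under a strictly monotone index map fixing -1.
theorem pgScan_relabel (φ : Int → Int) (hφ : StrictMono φ) (hφ1 : φ (-1) = -1)
    (l : List (Int × Int)) (m lm cm : Int) (prev : Option Int) :
    pgScan (l.map (fun p => (p.1, -φ (-p.2)))) m (φ lm) (φ cm) prev = pgScan l m lm cm prev := by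
  induction l generalizing m lm cm prev with
  | nil => rfl
  | cons p rest ih =>
    obtain ⟨v, negi⟩ := p
    simp only [List.map_cons, pgScan, neg_neg]
    cases prev with
    | none =>
      simp only [← hφ.monotone.map_max, hφ.lt_iff_lt]
      split_ifs <;> simp [ih]
    | some pv =>
      conv_lhs => rw [show (-1 : Int) = φ (-1) from hφ1.symm]
      simp only [← hφ.monotone.map_max, ← apply_ite φ, hφ.lt_iff_lt]
      split_ifs <;> simp [ih]

-- sorted-ness of arr in A's test ↔ Pairwise (· ≤ ·)
theorem sortedTest_iff (arr : List Int) :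
    arr = PySem.List.sorted arr (fun x => x) ↔ arr.Pairwise (· ≤ ·) := by
  constructor
  · intro h
    have := PySem.List.sorted_pairwise arr (fun x => x)
    rw [← h] at this
    exact this
  · intro h
    exact (PySem.List.sorted_eq_self_of_pairwise arr (fun x => x) h).symm

-- (S): a sorted list is fully accepted by the scan.
theorem pgM_of_sorted (arr : List Int) (h : arr.Pairwise (· ≤ ·)) :
    pgM arr = (arr.length : Int) := by
  have hlen : (pgOrder arr).length = arr.length := by
    rw [(pgOrder_perm arr).length_eq]
    simp [pgPairs, PySem.List.length_enumerate]
  have hg := List.pairwise_iff_getElem.mp h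
  have hidx : ∀ p ∈ pgOrder arr, ∀ q ∈ pgOrder arr, p.1 < q.1 → -p.2 < -q.2 := by
    intro p hp q hq hlt
    rcases (mem_pgOrder arr p).mp hp with ⟨a, ha, rfl⟩
    rcases (mem_pgOrder arr q).mp hq with ⟨b, hb, rfl⟩
    simp only [neg_neg]
    simp only at hlt
    by_contra hab
    have hba : b ≤ a := by omega
    rcases Nat.lt_or_ge b a with hba' | hba'
    · exact absurd (hg b a hb ha hba') (by omega)
    · have : a = b := by omega
      subst this; omega
  obtain ⟨s, hs⟩ := pgScanF_complete (pgOrder arr) 0 (-1) (-1) none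
    (pgOrder_pairwise arr) hidx
    (fun p hp => by rcases (mem_pgOrder arr p).mp hp with ⟨a, ha, rfl⟩; simp; omega)
    (fun p hp _ => by rcases (mem_pgOrder arr p).mp hp with ⟨a, ha, rfl⟩; simp; omega)
    (fun p hp pv hpv => by cases hpv)
    (fun p hp => by rcases (mem_pgOrder arr p).mp hp with ⟨a, ha, rfl⟩; simp)
  have hm := pgScanF_inr_m _ _ _ _ _ _ hs
  rw [pgM, pgScan_eq_scanF, hs]
  show s.1 = _
  simp only [hm, hlen]
  omega

-- (S'): if the scan accepts everything, arr is sorted.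
theorem sorted_of_pgM (arr : List Int)
    (h : ∃ s, pgScanF (pgOrder arr) 0 (-1) (-1) none = .inr s) :
    arr.Pairwise (· ≤ ·) := by
  have hmono := pgScanF_fin_mono (pgOrder arr) [] 0 (-1) (-1) none h
    (by simpa using pgOrder_pairwise arr)
    (by simpa using pgOrder_snd_ne arr)
    (Or.inl ⟨rfl, rfl⟩)
    (by simp)
  rw [List.pairwise_iff_getElem]
  intro a b ha hb hab
  by_contra hlt
  rw [not_le] at hlt
  have hpa : ((arr[a], -(a : Int)) : Int × Int) ∈ [] ++ pgOrder arr := by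
    simp only [List.nil_append, mem_pgOrder]; exact ⟨a, ha, rfl⟩
  have hpb : ((arr[b], -(b : Int)) : Int × Int) ∈ [] ++ pgOrder arr := by
    simp only [List.nil_append, mem_pgOrder]; exact ⟨b, hb, rfl⟩
  have := hmono _ hpb _ hpa hlt
  simp only [neg_neg] at this
  omega

-- A one-element scan that breaks returns its incoming count.
theorem pgScanF_single_inl (v negi m lm cm : Int) (prev : Option Int) (m' : Int)
    (h : pgScanF [(v, negi)] m lm cm prev = .inl m') : m' = m := by
  cases prev with
  | none =>
    rw [pgScanF_cons_none] at h
    split_ifs at h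
    · exact (Sum.inl.inj h).symm
    · exact absurd h (by simp [pgScanF])
  | some pv =>
    by_cases hvp : v = pv
    · subst hvp; rw [pgScanF_cons_eq] at h
      split_ifs at h
      · exact (Sum.inl.inj h).symm
      · exact absurd h (by simp [pgScanF])
    · rw [pgScanF_cons_ne _ _ _ _ _ _ _ hvp] at h
      split_ifs at h
      · exact (Sum.inl.inj h).symm
      · exact absurd h (by simp [pgScanF])

theorem pgM_erase (arr : List Int) (mx : Int) (maxim : Nat)
    (hmax : PySem.List.max? arr (fun x => x) = some mx)
    (hidx : PySem.List.index? arr mx = some maxim)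
    (hns : ¬ arr.Pairwise (· ≤ ·)) :
    pgM (arr.eraseIdx maxim) = pgM arr := by
  rcases PySem.List.getElem_of_index?_eq_some hidx with ⟨hlt, hget, hfirst⟩
  have hle : ∀ y ∈ arr, y ≤ mx := fun y hy => PySem.List.max?_isMax hmax y hy
  set rest := arr.eraseIdx maxim with hrestdef
  set ψ : Int → Int := fun x => if x < (maxim : Int) then x else x + 1 with hψdef
  set ρ : Int × Int → Int × Int := fun p => (p.1, -ψ (-p.2)) with hρdef
  have hψmono : StrictMono ψ := by
    intro a b hab; simp only [hψdef]; split_ifs <;> omega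
  have hψ1 : ψ (-1) = -1 := by simp only [hψdef]; rw [if_pos (by omega)]
  -- take/drop decomposition of arr around maxim
  set u : List Int := arr.take maxim with hudef
  set t : List Int := arr.drop (maxim + 1) with htdef
  have hulen : u.length = maxim := by
    rw [hudef, List.length_take]; omega
  have harr : arr = u ++ mx :: t := by
    conv_lhs => rw [← List.take_append_drop maxim arr]
    rw [← List.getElem_cons_drop hlt, hget]
  have hrest2 : rest = u ++ t := List.eraseIdx_eq_take_drop_succ arr maxim
  -- relabelling of enumerated pairs
  have subB : ∀ (l : List Int) (s : Int), (maxim : Int) ≤ s →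
      (PySem.List.enumerate l s).map (fun p => ρ (p.2, -p.1)) =
      (PySem.List.enumerate l (s + 1)).map (fun p => (p.2, -p.1)) := by
    intro l
    induction l with
    | nil => intro s _; simp [PySem.List.enumerate]
    | cons x l ih =>
      intro s hs
      rw [PySem.List.enumerate_cons, PySem.List.enumerate_cons]
      simp only [List.map_cons]
      rw [ih (s + 1) (by omega)]
      congr 1
      simp only [hρdef, hψdef, neg_neg]
      rw [if_neg (by omega)]
  have subA : ∀ (l : List Int) (s : Int), 0 ≤ s → s + l.length ≤ (maxim : Int) →
      (PySem.List.enumerate l s).map (fun p => ρ (p.2, -p.1)) =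
      (PySem.List.enumerate l s).map (fun p => (p.2, -p.1)) := by
    intro l s hs0 hsl
    refine List.map_congr_left ?_
    intro p hp
    rcases (PySem.List.mem_enumerate_iff l s p).mp hp with ⟨k, hk, rfl⟩
    simp only [hρdef, hψdef, neg_neg]
    rw [if_pos (by omega)]
  have hpairs_arr : pgPairs arr =
      (PySem.List.enumerate u 0).map (fun p => (p.2, -p.1)) ++
        (mx, -(maxim : Int)) :: (PySem.List.enumerate t ((maxim : Int) + 1)).map (fun p => (p.2, -p.1)) := by
    rw [pgPairs]
    conv_lhs => rw [harr]
    rw [PySem.List.enumerate_append, PySem.List.enumerate_cons, hulen]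
    simp only [List.map_append, List.map_cons]
    norm_num
  have hpairs_rest_map : (pgPairs rest).map ρ =
      (PySem.List.enumerate u 0).map (fun p => (p.2, -p.1)) ++
        (PySem.List.enumerate t ((maxim : Int) + 1)).map (fun p => (p.2, -p.1)) := by
    rw [pgPairs, hrest2, PySem.List.enumerate_append, hulen]
    rw [List.map_append, List.map_append, List.map_map, List.map_map]
    congr 1
    · rw [show ((fun p : Int × Int => ρ p) ∘ (fun p : Int × Int => (p.2, -p.1))) = (fun p : Int × Int => ρ (p.2, -p.1)) from rfl]
      exact subA u 0 le_rfl (by omega)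
    · rw [show ((fun p : Int × Int => ρ p) ∘ (fun p : Int × Int => (p.2, -p.1))) = (fun p : Int × Int => ρ (p.2, -p.1)) from rfl]
      rw [show ((0 : Int) + (maxim : Nat)) = (maxim : Int) from by omega]
      exact subB t (maxim : Int) le_rfl
  -- the decomposition of the sorted order
  have hperm : ((pgOrder rest).map ρ ++ [((mx, -(maxim : Int)) : Int × Int)]).Perm (pgPairs arr) := by
    have h1 : ((pgOrder rest).map ρ).Perm ((pgPairs rest).map ρ) := (pgOrder_perm rest).map ρ
    refine (h1.append_right _).trans ?_
    rw [hpairs_rest_map, hpairs_arr, List.append_assoc]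
    exact List.Perm.append_left _ (List.perm_append_singleton _ _)
  have hrlen : rest.length = arr.length - 1 := by
    rw [hrestdef, List.length_eraseIdx, if_pos hlt]
  have hrget : ∀ (j : Nat) (hj : j < rest.length),
      rest[j] = if h' : j < maxim then arr[j]'(by omega) else arr[j+1]'(by omega) := by
    intro j hj
    simp only [hrestdef]
    exact List.getElem_eraseIdx _
  have hcross : ∀ p ∈ (pgOrder rest).map ρ, lexLt p (mx, -(maxim : Int)) := by
    intro p hp
    rcases List.mem_map.mp hp with ⟨q, hq, rfl⟩
    rcases (mem_pgOrder rest q).mp hq with ⟨j, hj, rfl⟩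
    have hjmem : rest[j] ∈ arr := (List.eraseIdx_sublist arr maxim).subset (List.getElem_mem hj)
    have hlemx : rest[j] ≤ mx := hle _ hjmem
    simp only [hρdef, hψdef, neg_neg, lexLt]
    rcases lt_or_eq_of_le hlemx with hltmx | heqmx
    · exact Or.inl hltmx
    · refine Or.inr ⟨heqmx, ?_⟩
      rw [hrget j hj] at heqmx
      by_cases hjm : j < maxim
      · rw [dif_pos hjm] at heqmx
        exact absurd heqmx (hfirst j hjm)
      · rw [dif_neg hjm] at heqmx
        rw [if_neg (by omega)]
        omega
  have hwithin : ((pgOrder rest).map ρ).Pairwise lexLt := by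
    rw [List.pairwise_map]
    refine ((pgOrder_pairwise rest).and (pgOrder_snd_ne rest)).imp ?_
    rintro a b ⟨hab, hne⟩
    simp only [lexLe, lexLt, not_or, not_and, not_lt] at hab
    simp only [hρdef, hψdef, lexLt]
    split_ifs <;> omega
  have hdec : pgOrder arr = (pgOrder rest).map ρ ++ [((mx, -(maxim : Int)) : Int × Int)] := by
    refine pgOrder_eq_of_perm_of_pairwise arr _ hperm ?_
    refine List.pairwise_append.mpr ⟨hwithin, by simp, ?_⟩
    intro a ha b hb
    simp only [List.mem_singleton] at hb
    subst hb
    exact hcross a ha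
  -- the scan over the relabelled order equals the scan over rest's order
  have hstep2 : pgM rest = pgScan ((pgOrder rest).map ρ) 0 (-1) (-1) none := by
    rw [pgM]
    have := pgScan_relabel ψ hψmono hψ1 (pgOrder rest) 0 (-1) (-1) none
    rw [hψ1] at this
    rw [← this, hρdef]
  -- now compare
  cases hsc : pgScanF ((pgOrder rest).map ρ) 0 (-1) (-1) none with
  | inl m' =>
    have hrest : pgM rest = m' := by rw [hstep2, pgScan_eq_scanF, hsc]
    have harr : pgM arr = m' := by rw [pgM, hdec, pgScan_eq_scanF, pgScanF_append, hsc]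
    rw [hrest, harr]
  | inr s =>
    have hrest : pgM rest = s.1 := by rw [hstep2, pgScan_eq_scanF, hsc]
    cases hfull : pgScanF (pgOrder arr) 0 (-1) (-1) none with
    | inr sf => exact absurd (sorted_of_pgM arr ⟨sf, hfull⟩) hns
    | inl mf =>
      have harr : pgM arr = mf := by rw [pgM, pgScan_eq_scanF, hfull]
      have hfull' := hfull
      rw [hdec, pgScanF_append, hsc] at hfull'
      have hm := pgScanF_single_inl mx (-(maxim : Int)) s.1 s.2.1 s.2.2.1 s.2.2.2 mf hfull'
      rw [hrest, harr, hm]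

-- Main loop lemma.
theorem pgLoopA_eq (fuel : Nat) (arr : List Int) (player : Int) (hf : arr.length < fuel) :
    pgLoopA fuel arr player =
      (if PySem.Int.mod (player + ((arr.length : Int) - pgM arr)) 2 = 0 then "Bob" else "Alice") := by
  induction fuel generalizing arr player with
  | zero => omega
  | succ f ih =>
    by_cases h1 : arr.length = 1
    · rcases List.length_eq_one_iff.mp h1 with ⟨x, rfl⟩
      have hm := pgM_of_sorted [x] (by simp)
      rw [show pgLoopA (f + 1) [x] player =
          (if PySem.Int.mod player 2 = 0 then "Bob" else "Alice") from by simp [pgLoopA]]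
      rw [hm]
      norm_num
    · by_cases h2 : arr = PySem.List.sorted arr (fun x => x)
      · have hp := (sortedTest_iff arr).mp h2
        have hm := pgM_of_sorted arr hp
        rw [show pgLoopA (f + 1) arr player =
            (if PySem.Int.mod player 2 = 0 then "Bob" else "Alice") from by
          simp only [pgLoopA, if_neg h1, if_pos h2]]
        rw [hm]
        norm_num
      · have hne : arr ≠ [] := by
          intro h
          subst h
          exact h2 (PySem.List.sorted_eq_self_of_pairwise [] (fun x => x) (by simp)).symm
        have hlen1 : 1 ≤ arr.length := List.length_pos_iff.mpr hne
        obtain ⟨mx, hmx⟩ : ∃ mx, PySem.List.max? arr (fun x => x) = some mx := by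
          cases hm : PySem.List.max? arr (fun x => x) with
          | none => exact absurd ((PySem.List.max?_eq_none_iff arr _).mp hm) hne
          | some m => exact ⟨m, rfl⟩
        have hmem := PySem.List.max?_mem hmx
        obtain ⟨maxim, hmaxim⟩ : ∃ k, PySem.List.index? arr mx = some k := by
          cases hk : PySem.List.index? arr mx with
          | none => exact absurd ((PySem.List.index?_eq_none_iff arr mx).mp hk) (by simpa using hmem)
          | some k => exact ⟨k, rfl⟩
        rcases PySem.List.getElem_of_index?_eq_some hmaxim with ⟨hlt, hget, hfirst⟩
        have hpop := PySem.List.pop?_natCast arr maxim hlt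
        have hns : ¬ arr.Pairwise (· ≤ ·) := fun hp => h2 ((sortedTest_iff arr).mpr hp)
        have hKm := pgM_erase arr mx maxim hmx hmaxim hns
        have hrlen : (arr.eraseIdx maxim).length = arr.length - 1 := by
          rw [List.length_eraseIdx, if_pos hlt]
        rw [show pgLoopA (f + 1) arr player = pgLoopA f (arr.eraseIdx maxim) (player + 1) from by
          simp only [pgLoopA, if_neg h1, if_neg h2, hmx, hmaxim, hpop]]
        rw [ih _ _ (by omega), hKm, hrlen]
        have hc : ((arr.length - 1 : Nat) : Int) = (arr.length : Int) - 1 := by omega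
        rw [hc]
        have harith : player + 1 + ((arr.length : Int) - 1 - pgM arr) =
            player + ((arr.length : Int) - pgM arr) := by ring
        rw [harith]

theorem alt_eq (arr : List Int) :
    permutationGame_alt arr =
      (if PySem.Int.mod ((arr.length : Int) - pgM arr) 2 = 0 then "Bob" else "Alice") := by
  rfl

-- ===== VERDICT (by name: the statement is the Claim_ definition above) =====
theorem permutationGame_spec : Claim_equal_permutationGame := by
  intro arr _
  unfold Spec_permutationGame
  rw [alt_eq, permutationGame, pgLoopA_eq (arr.length + 1) arr 0 (by omega)]
  norm_num
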